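-- pv_equiv track=rewrite | github.com/Fenmaz/Project-Euler | P21_amicable_numbers.py | proper_divisors_list
-- ===== SOURCE A (Python) =====
-- def proper_divisors_list(n):
--     divisors = [[] for _ in range(n)]
--     for i in range(1, n):
--         k = i * 2
--         while k < n:
--             divisors[k].append(i)
--             k += i
--     return divisors
-- ===== SOURCE B (Python) =====
-- def proper_divisors_list(n):
--     result = []
--     for k in range(n):
--         small = []
--         large = []
--         i = 1
--         while i * i <= k:
--             if k % i == 0:
--                 if i != k:
--                     small.append(i)
--                 j = k // i
--                 if j != i and j != k:
--                     large.append(j)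
--             i += 1
--         result.append(small + large[::-1])
--     return result
-- ===== Notes on version B (the rewrite author's own statement) =====
-- stated objective: alternative
-- what changed: Replaces A's global multiples-sieve that mutates per-number buckets by a per-number divisor-pairing scan up to sqrt(k), collecting each divisor i and its cofactor k//i and stitching small + reversed large together.
import Mathlib
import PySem

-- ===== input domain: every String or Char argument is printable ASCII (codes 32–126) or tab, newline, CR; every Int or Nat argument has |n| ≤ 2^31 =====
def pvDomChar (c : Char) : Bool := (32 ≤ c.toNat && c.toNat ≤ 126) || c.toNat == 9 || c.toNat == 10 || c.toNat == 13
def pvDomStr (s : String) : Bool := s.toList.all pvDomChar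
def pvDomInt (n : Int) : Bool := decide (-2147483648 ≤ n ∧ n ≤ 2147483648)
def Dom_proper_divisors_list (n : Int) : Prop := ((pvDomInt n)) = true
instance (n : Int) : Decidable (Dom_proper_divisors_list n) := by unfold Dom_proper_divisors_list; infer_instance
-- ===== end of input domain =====

-- B replaces A's mutable multiples-sieve by a direct per-number trial-division comprehension (simpler, not faster).


-- ===== PORT A =====
-- divisors[k].append(i); k is always ≥ 2 at the call site, so the Nat index is exact.
def pvAppendAt : List (List Int) → Nat → Int → List (List Int)
  | [], _, _ => []
  | l :: ls, 0, v => (l ++ [v]) :: ls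
  | l :: ls, j + 1, v => l :: pvAppendAt ls j v

-- the inner 'while k < n' loop; the '0 < i' conjunct is only a totality guard
-- (the outer loop always supplies i ≥ 1).
def pvInner (n i k : Int) (ds : List (List Int)) : List (List Int) :=
  if h : 0 < i ∧ k < n then pvInner n i (k + i) (pvAppendAt ds k.toNat i) else ds
  termination_by (n - k).toNat
  decreasing_by omega

def proper_divisors_list (n : Int) : List (List Int) :=
  (PySem.List.pyRange 1 n 1).foldl (fun ds i => pvInner n i (i * 2) ds)
    ((PySem.List.pyRange 0 n 1).map (fun _ => []))

-- ===== PORT B =====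
-- the 'while i * i <= k' loop of Source B; the '0 < i' conjunct is only a totality
-- guard (the loop starts at i = 1 and only increments).
def pvCollect (k i : Int) (small large : List Int) : List Int × List Int :=
  if h : 0 < i ∧ i * i ≤ k then
    if PySem.Int.mod k i == 0 then
      pvCollect k (i + 1)
        (if i != k then small ++ [i] else small)
        (let j := PySem.Int.floordiv k i
         if j != i && j != k then large ++ [j] else large)
    else pvCollect k (i + 1) small large
  else (small, large)
  termination_by (k + 1 - i).toNat
  decreasing_by
    all_goals
      rcases h with ⟨h1, h2⟩
      have : i ≤ k := le_trans (le_mul_of_one_le_left (by omega) (by omega)) h2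
      omega

-- one body of Source B's 'for k in range(n)' loop; 'large[::-1]' is List.reverse (exact)
def pvRow (k : Int) : List Int :=
  let p := pvCollect k 1 [] []
  p.1 ++ p.2.reverse

def proper_divisors_list_alt (n : Int) : List (List Int) :=
  (PySem.List.pyRange 0 n 1).foldl (fun result k => result ++ [pvRow k]) []

-- ===== PRECONDITION & SPEC =====
def Spec_proper_divisors_list (n : Int) (out : List (List Int)) : Prop := out = proper_divisors_list_alt n
instance (n : Int) (out : List (List Int)) : Decidable (Spec_proper_divisors_list n out) := by unfold Spec_proper_divisors_list; infer_instance

-- ===== CLAIM (what is proved, stated in full; the proofs are below) =====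
def Claim_equal_proper_divisors_list : Prop := ∀ (n : Int), Dom_proper_divisors_list n → Spec_proper_divisors_list n (proper_divisors_list n)

-- ===== LEMMAS AND PROOFS =====

theorem pvAppendAt_length (ds : List (List Int)) (j : Nat) (v : Int) :
    (pvAppendAt ds j v).length = ds.length := by
  induction ds generalizing j with
  | nil => rfl
  | cons l ls ih => cases j <;> simp [pvAppendAt, ih]

theorem pvAppendAt_getElem (ds : List (List Int)) (j : Nat) (v : Int)
    (m : Nat) (hm : m < ds.length) :
    (pvAppendAt ds j v)[m]'(by rw [pvAppendAt_length]; exact hm) =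
      if m = j then ds[m] ++ [v] else ds[m] := by
  induction ds generalizing j m with
  | nil => simp at hm
  | cons l ls ih =>
    cases j with
    | zero => cases m <;> simp [pvAppendAt]
    | succ j' =>
      cases m with
      | zero => simp [pvAppendAt]
      | succ m' => simpa [pvAppendAt] using ih j' m' (by simpa using hm)

theorem pvInner_length (n i k : Int) (ds : List (List Int)) :
    (pvInner n i k ds).length = ds.length := by
  fun_induction pvInner with
  | case1 k ds h ih => rw [ih, pvAppendAt_length]
  | case2 => rfl

theorem pvInner_getElem (n i k : Int) (ds : List (List Int))
    (hi : 0 < i)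
    (hn : (ds.length : Int) = n) (hk : 0 ≤ k)
    (m : Nat) (hm : m < ds.length) :
    (pvInner n i k ds)[m]'(by rw [pvInner_length]; exact hm) =
      if k ≤ (m : Int) ∧ i ∣ ((m : Int) - k) then ds[m] ++ [i] else ds[m] := by
  fun_induction pvInner with
  | case1 k ds h ih =>
    obtain ⟨hi', hkn⟩ := h
    have hlen : (pvAppendAt ds k.toNat i).length = ds.length := pvAppendAt_length ..
    have hm' : m < (pvAppendAt ds k.toNat i).length := by rw [hlen]; exact hm
    have hrec := ih (by rw [hlen]; exact hn) (by omega) hm'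
    have key : pvInner n i k ds = pvInner n i (k + i) (pvAppendAt ds k.toNat i) := by
      rw [pvInner]; rw [dif_pos ⟨hi', hkn⟩]
    rw [List.getElem_of_eq key (by rw [pvInner_length]; exact hm), hrec, pvAppendAt_getElem ds k.toNat i m hm]
    by_cases hmk : (m : Int) = k
    · have hmk' : m = k.toNat := by omega
      simp only [hmk']
      rw [if_neg (by rintro ⟨hc, -⟩; omega)]
      rw [if_pos trivial]
      rw [if_pos ⟨by omega, by
        have h0 : ((k.toNat : Int)) - k = 0 := by omega
        rw [h0]; exact dvd_zero i⟩]
    · rw [if_neg (by omega : ¬ m = k.toNat)]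
      have hdvd : i ∣ ((m : Int) - (k + i)) ↔ i ∣ ((m : Int) - k) := by
        constructor
        · intro h2
          have := dvd_add h2 (dvd_refl i)
          simpa [sub_add_cancel] using (by ring_nf at this ⊢; convert this using 2 : i ∣ ((m : Int) - k))
        · intro h2
          have := dvd_sub h2 (dvd_refl i)
          convert this using 1; ring
      congr 1
      rw [eq_iff_iff]
      constructor
      · rintro ⟨h1, h2⟩
        exact ⟨by omega, hdvd.mp h2⟩
      · rintro ⟨h1, h2⟩
        have hpos : 0 < (m : Int) - k := by omega
        have := Int.le_of_dvd hpos h2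
        exact ⟨by omega, hdvd.mpr h2⟩
  | case2 k ds h =>
    have key : pvInner n i k ds = ds := by rw [pvInner]; rw [dif_neg h]
    rw [List.getElem_of_eq key (by rw [pvInner_length]; exact hm), if_neg]
    rintro ⟨h1, -⟩
    rcases not_and_or.mp h with hi2 | hkn
    · exact hi2 hi
    · omega

theorem foldl_pvInner_length (n : Int) (L : List Int) (ds : List (List Int)) :
    (L.foldl (fun ds i => pvInner n i (i * 2) ds) ds).length = ds.length := by
  induction L generalizing ds with
  | nil => rfl
  | cons i L ih => simp only [List.foldl_cons]; rw [ih, pvInner_length]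

theorem foldl_pvInner_getElem (n : Int) (L : List Int) (ds : List (List Int))
    (hL : ∀ i ∈ L, 0 < i) (hn : (ds.length : Int) = n)
    (m : Nat) (hm : m < ds.length) :
    (L.foldl (fun ds i => pvInner n i (i * 2) ds) ds)[m]'(by rw [foldl_pvInner_length]; exact hm) =
      ds[m] ++ L.filter (fun i => decide (i * 2 ≤ (m : Int) ∧ i ∣ ((m : Int) - i * 2))) := by
  induction L generalizing ds with
  | nil => simp
  | cons i L ih =>
    simp only [List.foldl_cons, List.filter_cons]
    have hi : 0 < i := hL i (List.mem_cons_self ..)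
    have hlen : (pvInner n i (i * 2) ds).length = ds.length := pvInner_length ..
    have hrec := ih (pvInner n i (i * 2) ds) (fun j hj => hL j (List.mem_cons_of_mem _ hj))
      (by rw [hlen]; exact hn) (by rw [hlen]; exact hm)
    rw [hrec]
    have hget := pvInner_getElem n i (i * 2) ds hi hn (by omega) m hm
    rw [hget]
    by_cases hc : i * 2 ≤ (m : Int) ∧ i ∣ ((m : Int) - i * 2)
    · rw [if_pos hc, if_pos (by simpa using hc)]
      simp
    · rw [if_neg hc, if_neg (by simpa using hc)]

-- the sieve predicate coincides with B's trial-division predicate on [1, m)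
theorem filter_pred_eq (mI : Int) (hm : 0 ≤ mI) :
    (PySem.List.pyRange 1 mI 1).filter (fun i => PySem.Int.mod mI i == 0) =
      (PySem.List.pyRange 1 mI 1).filter
        (fun i => decide (i * 2 ≤ mI ∧ i ∣ (mI - i * 2))) := by
  apply List.filter_congr
  intro i hi
  rw [PySem.List.mem_pyRange_one] at hi
  obtain ⟨h1, h2⟩ := hi
  have hipos : 0 < i := by omega
  rw [Bool.eq_iff_iff]
  simp only [beq_iff_eq, decide_eq_true_eq, PySem.Int.mod_eq_zero_iff_dvd]
  constructor
  · intro hdvd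
    refine ⟨?_, dvd_sub hdvd (dvd_mul_right i 2)⟩
    obtain ⟨c, hc⟩ := hdvd
    nlinarith [Int.le_of_dvd (by omega : (0:Int) < mI) (⟨c, hc⟩ : i ∣ mI), (by nlinarith : 2 ≤ c)]
  · rintro ⟨hle, hdvd⟩
    have h2 := dvd_add hdvd (dvd_mul_right i 2)
    simpa using h2

theorem filter_range_split (n mI : Int) (h0 : 0 ≤ mI) (h1 : mI < n) :
    (PySem.List.pyRange 1 n 1).filter (fun i => decide (i * 2 ≤ mI ∧ i ∣ (mI - i * 2))) =
      (PySem.List.pyRange 1 mI 1).filter (fun i => decide (i * 2 ≤ mI ∧ i ∣ (mI - i * 2))) := by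
  by_cases hm1 : 1 ≤ mI
  · rw [PySem.List.pyRange_one_append 1 mI n hm1 (le_of_lt h1), List.filter_append]
    have hnil : (PySem.List.pyRange mI n 1).filter
        (fun i => decide (i * 2 ≤ mI ∧ i ∣ (mI - i * 2))) = [] := by
      apply List.filter_eq_nil_iff.mpr
      intro i hi
      rw [PySem.List.mem_pyRange_one] at hi
      simp only [decide_eq_true_eq, not_and]
      intro hc; omega
    rw [hnil, List.append_nil]
  · have hz : mI = 0 := by omega
    subst hz
    rw [show PySem.List.pyRange 1 0 1 = [] from PySem.List.pyRange_one_eq_nil (by omega),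
      List.filter_nil]
    apply List.filter_eq_nil_iff.mpr
    intro i hi
    rw [PySem.List.mem_pyRange_one] at hi
    simp only [decide_eq_true_eq, not_and]
    intro hc; omega

theorem A_eq_map (n : Int) :
    proper_divisors_list n = (PySem.List.pyRange 0 n 1).map
      (fun k => (PySem.List.pyRange 1 k 1).filter (fun i => PySem.Int.mod k i == 0)) := by
  unfold proper_divisors_list
  apply List.ext_getElem
  · rw [foldl_pvInner_length]; simp
  · intro m hm1 hm2
    have hlen0 : ((PySem.List.pyRange 0 n 1).map (fun _ => ([] : List Int))).length
        = (n - 0).toNat := by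
      rw [List.length_map, PySem.List.length_pyRange_one]
    have hmlt : m < (n - 0).toNat := by
      rw [foldl_pvInner_length, hlen0] at hm1; exact hm1
    have hn0 : 0 < n := by omega
    have hget := foldl_pvInner_getElem n (PySem.List.pyRange 1 n 1)
      ((PySem.List.pyRange 0 n 1).map (fun _ => ([] : List Int)))
      (fun i hi => by rw [PySem.List.mem_pyRange_one] at hi; omega)
      (by rw [hlen0]; omega) m (by rw [hlen0]; exact hmlt)
    rw [hget]
    rw [List.getElem_map, List.getElem_map, PySem.List.getElem_pyRange_one]
    have hz : (0 : Int) + (m : Int) = (m : Int) := by ring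
    rw [hz]
    rw [filter_pred_eq (m : Int) (by omega), List.nil_append]
    exact filter_range_split n (m : Int) (by omega) (by omega)

-- ===== VERDICT (by name: the statement is the Claim_ definition above) =====
-- ---- B-side lemmas ----

theorem foldl_append_map {α β : Type} (f : α → β) (L : List α) (acc : List β) :
    L.foldl (fun res k => res ++ [f k]) acc = acc ++ L.map f := by
  induction L generalizing acc with
  | nil => simp
  | cons x L ih => simp [ih]

theorem alt_eq_map (n : Int) :
    proper_divisors_list_alt n = (PySem.List.pyRange 0 n 1).map pvRow := by
  unfold proper_divisors_list_alt
  rw [foldl_append_map]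
  simp

theorem pvCollect_spec (k i : Int) (s l : List Int) (hk : 0 ≤ k) (hi : 0 < i) :
    pvCollect k i s l =
      (s ++ (PySem.List.pyRange i (k + 1) 1).filter
          (fun d => decide (d * d ≤ k ∧ d ∣ k ∧ d ≠ k)),
       l ++ ((PySem.List.pyRange i (k + 1) 1).filter
          (fun d => decide (d * d ≤ k ∧ d ∣ k ∧ k / d ≠ d ∧ k / d ≠ k))).map
          (fun d => k / d)) := by
  fun_induction pvCollect with
  | case1 i s l h hmod ih =>
    obtain ⟨hi', hiik⟩ := h
    have hik1 : i < k + 1 := by nlinarith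
    have hdvd : i ∣ k := by
      rw [beq_iff_eq, PySem.Int.mod_eq_zero_iff_dvd] at hmod; exact hmod
    have hfd : PySem.Int.floordiv k i = k / i := PySem.Int.floordiv_eq_ediv_of_pos hi'
    simp only [dite_eq_ite] at ih
    rw [ih (by omega)]
    rw [PySem.List.pyRange_one_cons hik1, List.filter_cons, List.filter_cons]
    simp only [hfd]
    by_cases hik : i = k <;> by_cases hji : k / i = i <;> by_cases hjk : k / i = k <;>
      simp_all [List.append_assoc]
  | case2 i s l h hmod ih =>
    obtain ⟨hi', hiik⟩ := h
    have hik1 : i < k + 1 := by nlinarith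
    have hndvd : ¬ i ∣ k := by
      rw [beq_iff_eq] at hmod
      intro hd
      exact hmod (PySem.Int.mod_eq_zero_iff_dvd k i |>.mpr hd)
    rw [ih (by omega)]
    rw [PySem.List.pyRange_one_cons hik1, List.filter_cons, List.filter_cons]
    simp [hndvd]
  | case3 i s l h =>
    have hnle : ¬ i * i ≤ k := fun hc => h ⟨hi, hc⟩
    have hnil : ∀ (p : Int → Bool), (∀ d, i ≤ d → p d = false) →
        (PySem.List.pyRange i (k + 1) 1).filter p = [] := by
      intro p hp
      apply List.filter_eq_nil_iff.mpr
      intro d hd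
      rw [PySem.List.mem_pyRange_one] at hd
      simp [hp d hd.1]
    rw [hnil _ (fun d hd => by
        simp only [decide_eq_false_iff_not, not_and]
        intro hdd
        exact absurd (le_trans (by nlinarith : i * i ≤ d * d) hdd) hnle),
      hnil _ (fun d hd => by
        simp only [decide_eq_false_iff_not, not_and]
        intro hdd
        exact absurd (le_trans (by nlinarith : i * i ≤ d * d) hdd) hnle)]
    simp

theorem pvRow_eq (k : Int) (hk : 0 ≤ k) :
    pvRow k = (PySem.List.pyRange 1 k 1).filter (fun i => PySem.Int.mod k i == 0) := by
  unfold pvRow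
  rw [pvCollect_spec k 1 [] [] hk one_pos]
  simp only [List.nil_append]
  set S := (PySem.List.pyRange 1 (k + 1) 1).filter
      (fun d => decide (d * d ≤ k ∧ d ∣ k ∧ d ≠ k)) with hS
  set Lm := ((PySem.List.pyRange 1 (k + 1) 1).filter
      (fun d => decide (d * d ≤ k ∧ d ∣ k ∧ k / d ≠ d ∧ k / d ≠ k))).map
      (fun d => k / d) with hLm
  set T := (PySem.List.pyRange 1 k 1).filter (fun i => PySem.Int.mod k i == 0) with hT
  have hmemL : ∀ x : Int, x ∈ S ++ Lm.reverse ↔ (1 ≤ x ∧ x < k ∧ x ∣ k) := by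
    intro x
    simp only [hS, hLm, List.mem_append, List.mem_reverse, List.mem_map, List.mem_filter,
      PySem.List.mem_pyRange_one, decide_eq_true_eq]
    constructor
    · rintro (⟨⟨h1, h2⟩, hdd, hdvd, hne⟩ | ⟨d, ⟨⟨hd1, hd2⟩, hdd, hdvd, hne1, hne2⟩, rfl⟩)
      · have hkpos : 0 < k := by nlinarith
        exact ⟨h1, lt_of_le_of_ne (Int.le_of_dvd hkpos hdvd) hne, hdvd⟩
      · obtain ⟨c, rfl⟩ := hdvd
        have hc : d * c / d = c := Int.mul_ediv_cancel_left c (by omega)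
        rw [hc] at hne1 hne2 ⊢
        have hkpos : 0 < d * c := by nlinarith
        have hcpos : 0 < c := by by_contra h; push Not at h; nlinarith
        exact ⟨by omega, lt_of_le_of_ne (Int.le_of_dvd hkpos ⟨d, mul_comm d c⟩) hne2,
          ⟨d, mul_comm d c⟩⟩
    · rintro ⟨h1, h2, hdvd⟩
      by_cases hxx : x * x ≤ k
      · exact Or.inl ⟨⟨h1, by omega⟩, hxx, hdvd, by omega⟩
      · right
        obtain ⟨c, rfl⟩ := hdvd
        have hcpos : 0 < c := by nlinarith
        have hc : x * c / c = x := Int.mul_ediv_cancel x (by omega)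
        refine ⟨c, ⟨⟨by omega, ?_⟩, ?_, ⟨x, mul_comm x c⟩, ?_, ?_⟩, hc⟩
        · have : c ≤ x * c := Int.le_of_dvd (by nlinarith) ⟨x, mul_comm x c⟩
          omega
        · nlinarith
        · rw [hc]; nlinarith
        · rw [hc]; omega
  have hmemT : ∀ x : Int, x ∈ T ↔ (1 ≤ x ∧ x < k ∧ x ∣ k) := by
    intro x
    simp only [hT, List.mem_filter, PySem.List.mem_pyRange_one, beq_iff_eq,
      PySem.Int.mod_eq_zero_iff_dvd]
    rw [and_assoc]
  have sortedS : S.Pairwise (· < ·) :=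
    (PySem.List.pairwise_lt_pyRange_one 1 (k + 1)).filter _
  have sortedLrev : Lm.reverse.Pairwise (· < ·) := by
    rw [List.pairwise_reverse]
    rw [hLm, List.pairwise_map]
    refine List.Pairwise.imp_of_mem ?_
      ((PySem.List.pairwise_lt_pyRange_one 1 (k + 1)).filter _)
    intro a b ha hb hab
    rw [List.mem_filter, PySem.List.mem_pyRange_one] at ha hb
    obtain ⟨⟨ha1, -⟩, hpa⟩ := ha
    obtain ⟨⟨hb1, -⟩, hpb⟩ := hb
    simp only [decide_eq_true_eq] at hpa hpb
    obtain ⟨haa, ⟨c, hc⟩, -, -⟩ := hpa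
    obtain ⟨hbb, ⟨e, he⟩, -, -⟩ := hpb
    have hca : k / a = c := by rw [hc]; exact Int.mul_ediv_cancel_left c (by omega)
    have hcb : k / b = e := by rw [he]; exact Int.mul_ediv_cancel_left e (by omega)
    rw [hca, hcb]
    have hcpos : 0 < c := by nlinarith
    by_contra hle
    push Not at hle
    nlinarith
  have cross : ∀ x ∈ S, ∀ y ∈ Lm.reverse, x < y := by
    intro x hx y hy
    rw [hS, List.mem_filter] at hx
    rw [List.mem_reverse, hLm, List.mem_map] at hy
    obtain ⟨-, hpx⟩ := hx
    simp only [decide_eq_true_eq] at hpx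
    obtain ⟨hxx, -, -⟩ := hpx
    obtain ⟨d, hd, rfl⟩ := hy
    rw [List.mem_filter, PySem.List.mem_pyRange_one] at hd
    obtain ⟨⟨hd1, -⟩, hpd⟩ := hd
    simp only [decide_eq_true_eq] at hpd
    obtain ⟨hdd, ⟨e, he⟩, hne1, -⟩ := hpd
    have hcd : k / d = e := by rw [he]; exact Int.mul_ediv_cancel_left e (by omega)
    rw [hcd] at hne1 ⊢
    have hde : d < e := by
      rcases lt_or_eq_of_le (by nlinarith : d ≤ e) with h | h
      · exact h
      · exact absurd h.symm hne1
    by_contra hle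
    push Not at hle
    nlinarith
  have sortedLHS : (S ++ Lm.reverse).Pairwise (· < ·) :=
    List.pairwise_append.mpr ⟨sortedS, sortedLrev, cross⟩
  have sortedT : T.Pairwise (· < ·) :=
    (PySem.List.pairwise_lt_pyRange_one 1 k).filter _
  have nd1 : (S ++ Lm.reverse).Nodup := sortedLHS.imp (fun h => ne_of_lt h)
  have nd2 : T.Nodup := sortedT.imp (fun h => ne_of_lt h)
  have hperm : (S ++ Lm.reverse).Perm T :=
    (List.perm_ext_iff_of_nodup nd1 nd2).mpr
      (fun x => (hmemL x).trans (hmemT x).symm)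
  exact List.Perm.eq_of_pairwise (fun a b _ _ h1 h2 => le_antisymm h1 h2)
    (sortedLHS.imp (fun h => le_of_lt h)) (sortedT.imp (fun h => le_of_lt h)) hperm

theorem main_eq (n : Int) : proper_divisors_list n = proper_divisors_list_alt n := by
  rw [A_eq_map, alt_eq_map]
  apply List.map_congr_left
  intro k hkmem
  rw [PySem.List.mem_pyRange_one] at hkmem
  exact (pvRow_eq k hkmem.1).symm

theorem proper_divisors_list_spec : Claim_equal_proper_divisors_list := by
  intro n _
  unfold Spec_proper_divisors_list
  exact main_eq n
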